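-- pv_equiv track=rewrite | github.com/elucherini/ml-toys | linalg/equations.py | eigen_2x2
-- ===== SOURCE A (Python) =====
-- def eigen_2x2(m):
--     assert len(m) == 2 and len(m[0]) == 2
--     # (M - lambda * I) = 0
--     #
--     # | (m1 - lambda1) m2 |
--     # | m3 (m4 - lambda2) | = 0
--     #
--     # det = lambda^2 - (m1 + m4) * lambda + a1*a4 - a2*a3 = 0
--     # try for values of lambda until det == 0, or calculate them exactly
--     eigenvalues = []
--     for l in range(-10, 11):
--         det = (m[0][0] - l) * (m[1][1] - l) - m[0][1] * m[1][0]
--         if det == 0: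
--             eigenvalues.append(l)
--
--     return eigenvalues
-- ===== SOURCE B (Python) =====
-- def _isqrt(n):
--     # floor square root of n >= 0 by binary search
--     lo, hi = 0, n
--     while lo < hi:
--         mid = (lo + hi + 1) // 2
--         if mid * mid <= n:
--             lo = mid
--         else:
--             hi = mid - 1
--     return lo
--
--
-- def eigen_2x2(m):
--     assert len(m) == 2 and len(m[0]) == 2
--     a, b = m[0][0], m[0][1]
--     c, d = m[1][0], m[1][1]
--     t = a + d
--     p = a * d - b * c
--     disc = t * t - 4 * p
--     if disc < 0:
--         return []
--     s = _isqrt(disc)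
--     if s * s != disc or (t + s) % 2 != 0:
--         return []
--     r1 = (t - s) // 2
--     r2 = (t + s) // 2
--     roots = [r1] if r1 == r2 else [r1, r2]
--     return [r for r in roots if -10 <= r <= 10]
-- ===== Notes on version B (the rewrite author's own statement) =====
-- stated objective: alternative
-- what changed: Instead of scanning all 21 candidates l in [-10,10] and testing det==0, B solves the characteristic quadratic exactly: it computes the discriminant, takes an exact integer square root by binary search, derives the (at most two) integer roots in closed form and filters them to [-10,10].
import Mathlib
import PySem

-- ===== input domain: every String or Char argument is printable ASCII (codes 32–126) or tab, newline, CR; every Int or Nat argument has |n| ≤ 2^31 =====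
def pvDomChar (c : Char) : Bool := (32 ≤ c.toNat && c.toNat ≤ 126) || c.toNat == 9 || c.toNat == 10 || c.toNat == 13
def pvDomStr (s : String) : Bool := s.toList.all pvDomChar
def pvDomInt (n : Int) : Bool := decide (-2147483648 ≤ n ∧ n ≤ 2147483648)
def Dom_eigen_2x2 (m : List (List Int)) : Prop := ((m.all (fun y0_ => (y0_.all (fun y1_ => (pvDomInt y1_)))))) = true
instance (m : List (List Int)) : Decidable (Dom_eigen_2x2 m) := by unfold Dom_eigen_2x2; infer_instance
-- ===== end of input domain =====

-- B replaces A's scan of the 21 candidates in [-10,10] by solving the characteristic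
-- quadratic exactly (integer discriminant + binary-search integer square root); alternative decomposition, no speed claim.

-- ===== PORT A =====
def eigen_2x2 (m : List (List Int)) : List Int :=
  (PySem.List.pyRange (-10) 11 1).foldl
    (fun ev l =>
      if (PySem.List.pyGetD (PySem.List.pyGetD m 0 []) 0 0 - l) *
         (PySem.List.pyGetD (PySem.List.pyGetD m 1 []) 1 0 - l) -
         PySem.List.pyGetD (PySem.List.pyGetD m 0 []) 1 0 *
         PySem.List.pyGetD (PySem.List.pyGetD m 1 []) 0 0 = 0
      then ev ++ [l] else ev) []

-- ===== PORT B =====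
-- binary-search floor square root: transliteration of Source B's _isqrt while-loop
def isqrtLoop (n lo hi : Int) : Int :=
  if h : lo < hi then
    if PySem.Int.floordiv (lo + hi + 1) 2 * PySem.Int.floordiv (lo + hi + 1) 2 ≤ n then
      isqrtLoop n (PySem.Int.floordiv (lo + hi + 1) 2) hi
    else isqrtLoop n lo (PySem.Int.floordiv (lo + hi + 1) 2 - 1)
  else lo
termination_by (hi - lo).toNat
decreasing_by
  · simp only [PySem.Int.floordiv_eq_ediv_of_pos (by omega : (0:Int) < 2)] at *
    omega
  · simp only [PySem.Int.floordiv_eq_ediv_of_pos (by omega : (0:Int) < 2)] at *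
    omega

def eigen_2x2_alt (m : List (List Int)) : List Int :=
  let a := PySem.List.pyGetD (PySem.List.pyGetD m 0 []) 0 0
  let b := PySem.List.pyGetD (PySem.List.pyGetD m 0 []) 1 0
  let c := PySem.List.pyGetD (PySem.List.pyGetD m 1 []) 0 0
  let d := PySem.List.pyGetD (PySem.List.pyGetD m 1 []) 1 0
  let t := a + d
  let p := a * d - b * c
  let disc := t * t - 4 * p
  if disc < 0 then []
  else
    let s := isqrtLoop disc 0 disc
    if s * s ≠ disc ∨ PySem.Int.mod (t + s) 2 ≠ 0 then []
    else
      let r1 := PySem.Int.floordiv (t - s) 2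
      let r2 := PySem.Int.floordiv (t + s) 2
      let roots := if r1 = r2 then [r1] else [r1, r2]
      roots.filter (fun r => decide (-10 ≤ r) && decide (r ≤ 10))

-- ===== PRECONDITION & SPEC =====
-- Pre_ excludes only malformed shapes, on which A raises (AssertionError, or IndexError when row 1 is too short).
def Pre_eigen_2x2 (m : List (List Int)) : Prop :=
  m.length = 2 ∧ (m.getD 0 []).length = 2 ∧ 2 ≤ (m.getD 1 []).length
instance (m : List (List Int)) : Decidable (Pre_eigen_2x2 m) := by unfold Pre_eigen_2x2; infer_instance
def pvWitness_eigen_2x2 : List (List Int) := [[1, 0], [0, 2]]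

def Spec_eigen_2x2 (m : List (List Int)) (out : List Int) : Prop := out = eigen_2x2_alt m
instance (m : List (List Int)) (out : List Int) : Decidable (Spec_eigen_2x2 m out) := by unfold Spec_eigen_2x2; infer_instance

-- ===== CLAIM (what is proved, stated in full; the proofs are below) =====
def Claim_equal_eigen_2x2 : Prop := ∀ (m : List (List Int)), Dom_eigen_2x2 m → Pre_eigen_2x2 m → Spec_eigen_2x2 m (eigen_2x2 m)

-- ===== LEMMAS AND PROOFS =====

-- invariant of the binary search: the result squares to at most n and dominates every k with k*k ≤ n
theorem isqrt_inv (n : Int) :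
    ∀ lo hi : Int, 0 ≤ lo → lo * lo ≤ n → (∀ k : Int, 0 ≤ k → k * k ≤ n → k ≤ hi) →
      (isqrtLoop n lo hi) * (isqrtLoop n lo hi) ≤ n ∧
      (∀ k : Int, 0 ≤ k → k * k ≤ n → k ≤ isqrtLoop n lo hi) := by
  intro lo hi
  induction lo, hi using isqrtLoop.induct n with
  | case1 lo hi h hm ih =>
    intro hlo0 hlo hhi
    rw [isqrtLoop, dif_pos h, if_pos hm]
    have hmid0 : (0:Int) ≤ PySem.Int.floordiv (lo + hi + 1) 2 := by
      have := PySem.Int.floordiv_eq_ediv_of_pos (by omega : (0:Int) < 2) (a := lo + hi + 1)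
      omega
    exact ih hmid0 hm hhi
  | case2 lo hi h hm ih =>
    intro hlo0 hlo hhi
    rw [isqrtLoop, dif_pos h, if_neg hm]
    refine ih hlo0 hlo ?_
    intro k hk hkk
    have hhi' := hhi k hk hkk
    by_contra hcon
    have hkm : PySem.Int.floordiv (lo + hi + 1) 2 ≤ k := by omega
    have hmid0 : (0:Int) ≤ PySem.Int.floordiv (lo + hi + 1) 2 := by
      have := PySem.Int.floordiv_eq_ediv_of_pos (by omega : (0:Int) < 2) (a := lo + hi + 1)
      omega
    rw [not_le] at hm
    nlinarith [mul_le_mul hkm hkm hmid0 hk]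
  | case3 lo hi h =>
    intro hlo0 hlo hhi
    rw [isqrtLoop, dif_neg h]
    refine ⟨hlo, ?_⟩
    intro k hk hkk
    have := hhi k hk hkk
    omega

-- two strictly ascending lists with the same members are equal
theorem eq_of_sorted_lt_of_mem_iff :
    ∀ (l1 l2 : List Int), l1.Pairwise (· < ·) → l2.Pairwise (· < ·) →
      (∀ x, x ∈ l1 ↔ x ∈ l2) → l1 = l2 := by
  intro l1
  induction l1 with
  | nil =>
    intro l2 _ _ h
    cases l2 with
    | nil => rfl
    | cons b t => exact absurd ((h b).mpr (List.mem_cons_self)) (List.not_mem_nil)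
  | cons a t1 ih =>
    intro l2 h1 h2 h
    cases l2 with
    | nil => exact absurd ((h a).mp (List.mem_cons_self)) (List.not_mem_nil)
    | cons b t2 =>
      rw [List.pairwise_cons] at h1 h2
      obtain ⟨ha, hp1⟩ := h1
      obtain ⟨hb, hp2⟩ := h2
      have hab : a = b := by
        rcases List.mem_cons.mp ((h a).mp List.mem_cons_self) with h' | h'
        · exact h'
        · rcases List.mem_cons.mp ((h b).mpr List.mem_cons_self) with h'' | h''
          · exact h''.symm
          · exact absurd (ha b h'') (not_lt.mpr (le_of_lt (hb a h')))
      subst hab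
      have hnt1 : a ∉ t1 := fun hm => lt_irrefl a (ha a hm)
      have hnt2 : a ∉ t2 := fun hm => lt_irrefl a (hb a hm)
      congr 1
      apply ih t2 hp1 hp2
      intro x
      constructor
      · intro hx
        rcases List.mem_cons.mp ((h x).mp (List.mem_cons_of_mem a hx)) with h' | h'
        · exact absurd (h' ▸ hx) hnt1
        · exact h'
      · intro hx
        rcases List.mem_cons.mp ((h x).mpr (List.mem_cons_of_mem a hx)) with h' | h'
        · exact absurd (h' ▸ hx) hnt2
        · exact h'

-- filtering a strictly ascending list for membership in {r1, r2}
theorem filter_pair (r1 r2 : Int) (h12 : r1 ≤ r2) (xs : List Int) (hpw : xs.Pairwise (· < ·)) :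
    xs.filter (fun l => decide (l = r1 ∨ l = r2)) =
      (if r1 ∈ xs then [r1] else []) ++ (if r2 ∈ xs ∧ r2 ≠ r1 then [r2] else []) := by
  apply eq_of_sorted_lt_of_mem_iff
  · exact hpw.filter _
  · split_ifs with a b c <;> simp_all
    omega
  · intro x
    simp only [List.mem_filter, decide_eq_true_eq, List.mem_append]
    split_ifs with a b c <;> simp_all <;> try tauto
    · rintro (rfl | rfl)
      · exact a
      · exact b.1
    · constructor
      · rintro ⟨hx, rfl | rfl⟩
        · rfl
        · exact b hx
      · rintro rfl
        exact ⟨a, Or.inl rfl⟩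
    · constructor
      · rintro ⟨hx, rfl | rfl⟩
        · exact absurd hx a
        · rfl
      · rintro rfl
        exact ⟨c.1, Or.inr rfl⟩
    · intro hx
      constructor
      · rintro rfl
        exact a hx
      · rintro rfl
        exact a (c hx ▸ hx)

-- filter on one- and two-element literal lists
theorem filter_one (p : Int → Bool) (x : Int) :
    List.filter p [x] = if p x then [x] else [] := by
  simp [List.filter_cons]

theorem filter_two (p : Int → Bool) (x y : Int) :
    List.filter p [x, y] = (if p x then [x] else []) ++ (if p y then [y] else []) := by
  by_cases hx : p x <;> by_cases hy : p y <;> simp [hx, hy]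

-- the heart of the equivalence, over the four matrix entries
theorem key (a b c d : Int) :
    (PySem.List.pyRange (-10) 11 1).foldl
      (fun ev l => if (a - l) * (d - l) - b * c = 0 then ev ++ [l] else ev) [] =
    (let t := a + d
     let p := a * d - b * c
     let disc := t * t - 4 * p
     if disc < 0 then []
     else
       let s := isqrtLoop disc 0 disc
       if s * s ≠ disc ∨ PySem.Int.mod (t + s) 2 ≠ 0 then []
       else
         let r1 := PySem.Int.floordiv (t - s) 2
         let r2 := PySem.Int.floordiv (t + s) 2
         let roots := if r1 = r2 then [r1] else [r1, r2]
         roots.filter (fun r => decide (-10 ≤ r) && decide (r ≤ 10))) := by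
  rw [PySem.List.foldl_append_ite_eq_filter, List.nil_append]
  show _ = (if (a + d) * (a + d) - 4 * (a * d - b * c) < 0 then [] else _)
  set D := (a + d) * (a + d) - 4 * (a * d - b * c) with hD
  have hiff : ∀ l : Int, ((a - l) * (d - l) - b * c = 0) ↔
      (2 * l - (a + d)) * (2 * l - (a + d)) = D := by
    intro l
    have hr : (2 * l - (a + d)) * (2 * l - (a + d)) - D = 4 * ((a - l) * (d - l) - b * c) := by
      rw [hD]; ring
    constructor <;> intro h <;> linarith
  by_cases hneg : D < 0
  · rw [if_pos hneg]
    apply List.filter_eq_nil_iff.mpr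
    intro l _
    simp only [decide_eq_true_eq]
    intro hPl
    rw [hiff l] at hPl
    nlinarith [mul_self_nonneg (2 * l - (a + d))]
  · rw [if_neg hneg]
    have hD0 : 0 ≤ D := by omega
    obtain ⟨hs1, hs2⟩ := isqrt_inv D 0 D le_rfl (by simpa using hD0)
      (fun k hk hkk => by nlinarith)
    have hs0 : 0 ≤ isqrtLoop D 0 D := hs2 0 le_rfl (by simpa using hD0)
    set s := isqrtLoop D 0 D with hs
    by_cases hbad : s * s ≠ D ∨ PySem.Int.mod ((a + d) + s) 2 ≠ 0
    · rw [if_pos hbad]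
      apply List.filter_eq_nil_iff.mpr
      intro l _
      simp only [decide_eq_true_eq]
      intro hPl
      rw [hiff l] at hPl
      have habs : s = 2 * l - (a + d) ∨ s = -(2 * l - (a + d)) := by
        by_cases hu : 0 ≤ 2 * l - (a + d)
        · left
          have h1 := hs2 _ hu (le_of_eq hPl)
          have h2 : s ≤ 2 * l - (a + d) := by nlinarith
          omega
        · right
          have hu' : 0 ≤ -(2 * l - (a + d)) := by omega
          have h1 := hs2 _ hu' (by nlinarith)
          have h2 : s ≤ -(2 * l - (a + d)) := by nlinarith
          omega
      have hsq : s * s = D := by rcases habs with h | h <;> rw [h] <;> linarith [hPl] 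
      have hmod : PySem.Int.mod ((a + d) + s) 2 = 0 := by
        apply (PySem.Int.mod_eq_zero_iff_dvd _ _).mpr
        rcases habs with h | h
        · exact ⟨l, by omega⟩
        · exact ⟨(a + d) - l, by omega⟩
      tauto
    · rw [if_neg hbad]
      rw [not_or, not_ne_iff, not_ne_iff] at hbad
      obtain ⟨hsq, hmod⟩ := hbad
      obtain ⟨q, hq⟩ := (PySem.Int.mod_eq_zero_iff_dvd _ _).mp hmod
      have hr2 : PySem.Int.floordiv ((a + d) + s) 2 = q := by
        rw [PySem.Int.floordiv_eq_ediv_of_pos (by omega : (0:Int) < 2)]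
        omega
      have hr1 : PySem.Int.floordiv ((a + d) - s) 2 = q - s := by
        rw [PySem.Int.floordiv_eq_ediv_of_pos (by omega : (0:Int) < 2)]
        omega
      rw [hr1, hr2]
      have hiff2 : ∀ l : Int, ((a - l) * (d - l) - b * c = 0) ↔ (l = q - s ∨ l = q) := by
        intro l
        rw [hiff l]
        have hfact : (2 * l - (a + d) - s) * (2 * l - (a + d) + s) =
            (2 * l - (a + d)) * (2 * l - (a + d)) - s * s := by ring
        constructor
        · intro h
          have : (2 * l - (a + d) - s) * (2 * l - (a + d) + s) = 0 := by
            rw [hfact, h, hsq]; ring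
          rcases mul_eq_zero.mp this with h' | h' <;> omega
        · rintro (rfl | rfl) <;> nlinarith
      rw [List.filter_congr (fun l _ => decide_eq_decide.mpr (hiff2 l))]
      rw [filter_pair (q - s) q (by omega) _ (by decide)]
      clear_value s
      clear hiff hiff2 hs1 hs2 hs hsq hmod hr1 hr2 hneg hD0 hq
      clear_value D
      clear hD D
      simp only [PySem.List.mem_pyRange_one]
      split_ifs <;> simp_all [filter_one, filter_two] <;>
        (try (split_ifs <;> simp_all)) <;> omega

-- ===== VERDICT (by name: the statement is the Claim_ definition above) =====
theorem eigen_2x2_spec : Claim_equal_eigen_2x2 := by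
  intro m _ _
  show eigen_2x2 m = eigen_2x2_alt m
  rw [eigen_2x2, eigen_2x2_alt]
  exact key _ _ _ _
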